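-- pv_equiv track=rewrite | github.com/AlejandroPiCano/AdventJS2024 | Python/Day19.py | distribute_weight
-- ===== SOURCE A (Python) =====
-- def distribute_weight(weight):
--     def paint_boxes(boxes):
--         rep = {
--             1: [" _ ", "|_|"],
--             2: [" ___ ", "|___|"],
--             5: [" _____ ", "|     |", "|_____|"],
--             10: [" _________ ", "|         |", "|_________|"]
--         }
--
--         result = ''
--         before = ''
--
--         for i in range(len(boxes)):
--             box = boxes[i]
--
--             if before:
--                 result += before.ljust(len(rep[box][0]) - 1, "_") + "\n"
--
--             for j, b in enumerate(rep[box]):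
--                 if (not before or j > 0) and j < len(rep[box]) - 1:
--                     result += b + "\n"
--
--             before = rep[box][-1]
--
--             if i == len(boxes) - 1:
--                 result += before
--
--         return result
--
--     weights = [1, 2, 5, 10]
--     boxes = []
--
--     for w in reversed(weights):
--         while weight - w >= 0:
--             weight -= w
--             boxes.insert(0, w)
--
--     result = paint_boxes(boxes)
--     return result
-- ===== SOURCE B (Python) =====
-- def distribute_weight(weight):
--     REP = {
--         1: [" _ ", "|_|"],
--         2: [" ___ ", "|___|"],
--         5: [" _____ ", "|     |", "|_____|"],
--         10: [" _________ ", "|         |", "|_________|"]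
--     }
--     if weight < 0:
--         boxes = []
--     else:
--         tens, r = divmod(weight, 10)
--         fives, r = divmod(r, 5)
--         twos, ones = divmod(r, 2)
--         boxes = [1] * ones + [2] * twos + [5] * fives + [10] * tens
--     lines = []
--     bottom = None
--     for box in boxes:
--         art = REP[box]
--         if bottom is None:
--             lines.extend(art[:-1])
--         else:
--             lines.append(bottom.ljust(len(art[0]) - 1, "_"))
--             lines.extend(art[1:-1])
--         bottom = art[-1]
--     if bottom is not None:
--         lines.append(bottom)
--     return "\n".join(lines)
-- ===== Notes on version B (the rewrite author's own statement) =====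
-- stated objective: faster
-- what changed: B computes the box counts directly with divmod (replacing A's four repeated-subtraction while-loops with O(n^2) front-insertion) and paints by collecting the lines in a list joined once at the end, instead of A's indexed loop that concatenates onto a string and special-cases the last index.
import Mathlib
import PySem

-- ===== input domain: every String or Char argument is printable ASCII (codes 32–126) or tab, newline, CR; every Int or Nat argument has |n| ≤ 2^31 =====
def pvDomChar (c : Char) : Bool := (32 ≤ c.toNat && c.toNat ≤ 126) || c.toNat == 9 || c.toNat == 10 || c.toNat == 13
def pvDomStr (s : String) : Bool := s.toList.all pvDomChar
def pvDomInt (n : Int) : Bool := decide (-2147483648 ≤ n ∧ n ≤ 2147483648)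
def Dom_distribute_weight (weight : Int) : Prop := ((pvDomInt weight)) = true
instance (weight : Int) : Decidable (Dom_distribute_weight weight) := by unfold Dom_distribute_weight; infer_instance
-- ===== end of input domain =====

-- B replaces A's four repeated-subtraction while-loops (with quadratic front-insertion) by
-- divmod counts and builds the drawing as a list of lines joined once; measured faster.

-- ===== PORT A =====

-- shared stdlib shim: str.ljust(w, fill) for a single-char fill (exact; pads right up to width w)
def pyLjust (s : String) (w : Int) (fill : Char) : String :=
  s ++ String.ofList (List.replicate (w - (PySem.Str.len s : Int)).toNat fill)

-- the `rep` / `REP` dict literal both Pythons carry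
def boxRep : PySem.Dict Int (List String) :=
  PySem.Dict.ofList
    [(1, [" _ ", "|_|"]),
     (2, [" ___ ", "|___|"]),
     (5, [" _____ ", "|     |", "|_____|"]),
     (10, [" _________ ", "|         |", "|_________|"])]

-- A's inner `while weight - w >= 0: weight -= w; boxes.insert(0, w)`.
-- The guard 0 < w is a totality guard only: A runs it with w ∈ {10,5,2,1}.
def loopA (w v : Int) (boxes : List Int) : Int × List Int :=
  if _h : 0 < w ∧ 0 ≤ v - w then loopA w (v - w) (w :: boxes) else (v, boxes)
termination_by v.toNat
decreasing_by omega

-- A's nested helper paint_boxes; dict lookups rep[box] and the indexings boxes[i],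
-- rep[box][0], rep[box][-1] are always in range/in the dict in A, so the total getD forms are exact.
def paint_boxes (boxes : List Int) : String :=
  ((PySem.List.pyRange 0 (boxes.length : Int) 1).foldl (fun st i =>
      let result := st.1
      let before := st.2
      let box := PySem.List.pyGetD boxes i 0
      let lines := PySem.Dict.getD boxRep box []
      let result := if before ≠ "" then
          result ++ pyLjust before ((PySem.Str.len (PySem.List.pyGetD lines 0 "") : Int) - 1) '_' ++ "\n"
        else result
      let result := (PySem.List.enumerate lines 0).foldl (fun r jb =>
          if (before = "" ∨ 0 < jb.1) ∧ jb.1 < (lines.length : Int) - 1 then r ++ jb.2 ++ "\n" else r)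
        result
      let before := PySem.List.pyGetD lines (-1) ""
      let result := if i = (boxes.length : Int) - 1 then result ++ before else result
      (result, before))
    ("", "")).1

def distribute_weight (weight : Int) : String :=
  let weights : List Int := [1, 2, 5, 10]
  let st := weights.reverse.foldl (fun (st : Int × List Int) w => loopA w st.1 st.2) (weight, [])
  paint_boxes st.2

-- ===== PORT B =====

def distribute_weight_alt (weight : Int) : String :=
  let boxes : List Int :=
    if weight < 0 then []
    else
      let tens := PySem.Int.floordiv weight 10
      let r := PySem.Int.mod weight 10
      let fives := PySem.Int.floordiv r 5
      let r2 := PySem.Int.mod r 5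
      let twos := PySem.Int.floordiv r2 2
      let ones := PySem.Int.mod r2 2
      PySem.List.pyRepeat [1] ones ++ PySem.List.pyRepeat [2] twos ++
        PySem.List.pyRepeat [5] fives ++ PySem.List.pyRepeat [10] tens
  let st := boxes.foldl (fun (st : List String × Option String) box =>
      let art := PySem.Dict.getD boxRep box []
      match st.2 with
      | none =>
          (st.1 ++ PySem.List.slice art none (some (-1)), some (PySem.List.pyGetD art (-1) ""))
      | some bottom =>
          (st.1 ++ [pyLjust bottom ((PySem.Str.len (PySem.List.pyGetD art 0 "") : Int) - 1) '_']
              ++ PySem.List.slice art (some 1) (some (-1)),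
           some (PySem.List.pyGetD art (-1) "")))
    ([], none)
  let lines := match st.2 with
    | none => st.1
    | some bottom => st.1 ++ [bottom]
  PySem.Str.join "\n" lines

-- ===== PRECONDITION & SPEC =====
def Spec_distribute_weight (weight : Int) (out : String) : Prop := out = distribute_weight_alt weight
instance (weight : Int) (out : String) : Decidable (Spec_distribute_weight weight out) := by unfold Spec_distribute_weight; infer_instance

-- ===== CLAIM (what is proved, stated in full; the proofs are below) =====
def Claim_equal_distribute_weight : Prop := ∀ (weight : Int), Dom_distribute_weight weight → Spec_distribute_weight weight (distribute_weight weight)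


-- ===== LEMMAS AND PROOFS =====

-- proof-side views of the shared art constants
def artOf (box : Int) : List String := PySem.Dict.getD boxRep box []
def bottomOf (box : Int) : String := PySem.List.pyGetD (artOf box) (-1) ""
def mergeOf (bef : String) (box : Int) : String :=
  pyLjust bef ((PySem.Str.len (PySem.List.pyGetD (artOf box) 0 "") : Int) - 1) '_'
def midOf (box : Int) : List String := PySem.List.slice (artOf box) (some 1) (some (-1))
def headsOf (box : Int) : List String := PySem.List.slice (artOf box) none (some (-1))

def keysP (box : Int) : Prop := box = 1 ∨ box = 2 ∨ box = 5 ∨ box = 10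

-- A's per-box loop body, without the last-index special case
def bodyA (st : String × String) (box : Int) : String × String :=
  let lines := artOf box
  let r1 := if st.2 ≠ "" then st.1 ++ mergeOf st.2 box ++ "\n" else st.1
  let r2 := (PySem.List.enumerate lines 0).foldl (fun r jb =>
      if (st.2 = "" ∨ 0 < jb.1) ∧ jb.1 < (lines.length : Int) - 1 then r ++ jb.2 ++ "\n" else r) r1
  (r2, bottomOf box)

def paintStep (boxes : List Int) (st : String × String) (i : Int) : String × String :=
  let st' := bodyA st (PySem.List.pyGetD boxes i 0)
  ((if i = (boxes.length : Int) - 1 then st'.1 ++ st'.2 else st'.1), st'.2)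

-- A's paint loop as structural recursion on the box list
def goA (st : String × String) : List Int → String
  | [] => st.1
  | [b] => (bodyA st b).1 ++ (bodyA st b).2
  | b :: b2 :: bs => goA (bodyA st b) (b2 :: bs)

-- concatenation of lines, each followed by a newline
def prefNL : List String → String
  | [] => ""
  | x :: l => x ++ "\n" ++ prefNL l

-- B's line list from a current bottom line onwards
def blB (bef : String) : List Int → List String
  | [] => [bef]
  | b :: bs => (mergeOf bef b :: midOf b) ++ blB (bottomOf b) bs

-- B's fold step and finalization, via the views above
def stepB (st : List String × Option String) (box : Int) : List String × Option String :=
  match st.2 with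
  | none => (st.1 ++ headsOf box, some (bottomOf box))
  | some bottom => (st.1 ++ [mergeOf bottom box] ++ midOf box, some (bottomOf box))

def finB (st : List String × Option String) : String :=
  PySem.Str.join "\n" (match st.2 with | none => st.1 | some bottom => st.1 ++ [bottom])

-- B's box list
def boxesB (weight : Int) : List Int :=
  if weight < 0 then []
  else
    let tens := PySem.Int.floordiv weight 10
    let r := PySem.Int.mod weight 10
    let fives := PySem.Int.floordiv r 5
    let r2 := PySem.Int.mod r 5
    let twos := PySem.Int.floordiv r2 2
    let ones := PySem.Int.mod r2 2
    PySem.List.pyRepeat [1] ones ++ PySem.List.pyRepeat [2] twos ++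
      PySem.List.pyRepeat [5] fives ++ PySem.List.pyRepeat [10] tens

theorem loopA_spec (w v : Int) (bs : List Int) (hw : 0 < w) :
    loopA w v bs =
      if 0 ≤ v then (PySem.Int.mod v w, List.replicate (PySem.Int.floordiv v w).toNat w ++ bs)
      else (v, bs) := by
  fun_induction loopA w v bs with
  | case1 v bs h ih =>
      rw [ih]
      have hv : 0 ≤ v := by omega
      rw [if_pos (by omega : (0:Int) ≤ v - w), if_pos hv]
      have hmod : PySem.Int.mod (v - w) w = PySem.Int.mod v w := by
        rw [PySem.Int.mod_eq_emod_of_pos hw, PySem.Int.mod_eq_emod_of_pos hw]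
        have : v - w = v + -1 * w := by ring
        rw [this, Int.add_mul_emod_self_right]
      have hdiv : PySem.Int.floordiv (v - w) w = PySem.Int.floordiv v w - 1 := by
        rw [PySem.Int.floordiv_eq_ediv_of_pos hw, PySem.Int.floordiv_eq_ediv_of_pos hw]
        have : v - w = v + -1 * w := by ring
        rw [this, Int.add_mul_ediv_right _ _ (by omega : w ≠ 0)]; ring
      have hge : 1 ≤ PySem.Int.floordiv v w := by
        rw [PySem.Int.floordiv_eq_ediv_of_pos hw, Int.le_ediv_iff_mul_le hw]; omega
      have hn : (PySem.Int.floordiv v w).toNat = (PySem.Int.floordiv (v - w) w).toNat + 1 := by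
        omega
      rw [hmod, hn, List.replicate_succ']
      simp
  | case2 v bs h =>
      by_cases hv : 0 ≤ v
      · rw [if_pos hv]
        have hlt : v < w := by omega
        rw [PySem.Int.mod_eq_emod_of_pos hw, PySem.Int.floordiv_eq_ediv_of_pos hw]
        rw [Int.emod_eq_of_lt hv hlt, Int.ediv_eq_zero_of_lt hv hlt]
        simp
      · rw [if_neg hv]

theorem art1 : artOf 1 = [" _ ", "|_|"] := by decide
theorem art2 : artOf 2 = [" ___ ", "|___|"] := by decide
theorem art5 : artOf 5 = [" _____ ", "|     |", "|_____|"] := by decide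
theorem art10 : artOf 10 = [" _________ ", "|         |", "|_________|"] := by decide

theorem floordiv_one (x : Int) : PySem.Int.floordiv x 1 = x := by
  rw [PySem.Int.floordiv_eq_ediv_of_pos (by norm_num)]; exact Int.ediv_one x

theorem boxesA_eq (weight : Int) :
    (([1, 2, 5, 10] : List Int).reverse.foldl (fun (st : Int × List Int) w => loopA w st.1 st.2)
        (weight, [])).2 = boxesB weight := by
  by_cases hw : 0 ≤ weight
  · rw [show ([1, 2, 5, 10] : List Int).reverse = [10, 5, 2, 1] from rfl]
    simp only [List.foldl_cons, List.foldl_nil]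
    rw [loopA_spec 10 weight [] (by norm_num), if_pos hw]
    dsimp only
    rw [loopA_spec 5 _ _ (by norm_num), if_pos (PySem.Int.mod_nonneg _ (by norm_num))]
    dsimp only
    rw [loopA_spec 2 _ _ (by norm_num), if_pos (PySem.Int.mod_nonneg _ (by norm_num))]
    dsimp only
    rw [loopA_spec 1 _ _ (by norm_num), if_pos (PySem.Int.mod_nonneg _ (by norm_num))]
    dsimp only
    rw [boxesB, if_neg (by omega)]
    simp [PySem.List.pyRepeat_singleton, floordiv_one, List.append_assoc]
  · rw [show ([1, 2, 5, 10] : List Int).reverse = [10, 5, 2, 1] from rfl]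
    simp only [List.foldl_cons, List.foldl_nil]
    rw [loopA_spec 10 weight [] (by norm_num), if_neg hw]
    dsimp only
    rw [loopA_spec 5 _ _ (by norm_num), if_neg hw]
    dsimp only
    rw [loopA_spec 2 _ _ (by norm_num), if_neg hw]
    dsimp only
    rw [loopA_spec 1 _ _ (by norm_num), if_neg hw]
    rw [boxesB, if_pos (by omega)]

theorem boxesB_mem (weight : Int) : ∀ b ∈ boxesB weight, keysP b := by
  intro b hb
  rw [boxesB] at hb
  by_cases hw : weight < 0
  · rw [if_pos hw] at hb; simp at hb
  · rw [if_neg hw] at hb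
    simp only [PySem.List.pyRepeat_singleton, List.mem_append, List.mem_replicate] at hb
    unfold keysP
    tauto

theorem joinNL_cons (x : String) (l : List String) (h : l ≠ []) :
    PySem.Str.join "\n" (x :: l) = x ++ "\n" ++ PySem.Str.join "\n" l := by
  obtain ⟨y, l', rfl⟩ := List.exists_cons_of_ne_nil h
  apply String.toList_inj.mp
  simp [PySem.Str.toList_join, PySem.Chars.join_cons_cons, String.toList_append]

theorem joinNL_singleton (x : String) : PySem.Str.join "\n" [x] = x := by
  apply String.toList_inj.mp
  simp [PySem.Str.toList_join, PySem.Chars.join_singleton]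

theorem joinNL_nil : PySem.Str.join "\n" ([] : List String) = "" := by
  apply String.toList_inj.mp
  simp [PySem.Str.toList_join, PySem.Chars.join_nil]

theorem joinNL_append (xs ys : List String) (h : ys ≠ []) :
    PySem.Str.join "\n" (xs ++ ys) = prefNL xs ++ PySem.Str.join "\n" ys := by
  induction xs with
  | nil => simp [prefNL]
  | cons x xs ih =>
      rw [List.cons_append, joinNL_cons x (xs ++ ys) (by simp [h]), ih]
      simp [prefNL, String.append_assoc]

theorem bodyA_ne (res bef : String) (box : Int) (hb : keysP box) (hbef : bef ≠ "") :
    bodyA (res, bef) box = (res ++ prefNL (mergeOf bef box :: midOf box), bottomOf box) := by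
  rcases hb with rfl | rfl | rfl | rfl <;>
    simp [bodyA, mergeOf, midOf, bottomOf, prefNL, hbef, art1, art2, art5, art10,
      PySem.List.enumerate_cons, PySem.List.enumerate_nil, PySem.List.slice,
      PySem.List.pyGetD, PySem.List.pyGet?, PySem.List.pyIdx?, String.append_assoc]

theorem bodyA_emp (res : String) (box : Int) (hb : keysP box) :
    bodyA (res, "") box = (res ++ prefNL (headsOf box), bottomOf box) := by
  rcases hb with rfl | rfl | rfl | rfl <;>
    simp [bodyA, headsOf, bottomOf, prefNL, art1, art2, art5, art10,
      PySem.List.enumerate_cons, PySem.List.enumerate_nil, PySem.List.slice,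
      PySem.List.pyGetD, PySem.List.pyGet?, PySem.List.pyIdx?, String.append_assoc]

theorem bottomOf_ne (box : Int) (hb : keysP box) : bottomOf box ≠ "" := by
  rcases hb with rfl | rfl | rfl | rfl <;> decide

theorem blB_ne_nil (bef : String) (bs : List Int) : blB bef bs ≠ [] := by
  cases bs <;> simp [blB]

theorem goA_join (bs : List Int) (h : ∀ b ∈ bs, keysP b) (res bef : String) (hbef : bef ≠ "")
    (hbs : bs ≠ []) :
    goA (res, bef) bs = res ++ PySem.Str.join "\n" (blB bef bs) := by
  induction bs generalizing res bef with
  | nil => exact absurd rfl hbs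
  | cons b bs ih =>
      have hb : keysP b := h b (List.mem_cons_self)
      cases bs with
      | nil =>
          rw [show goA (res, bef) [b] = (bodyA (res, bef) b).1 ++ (bodyA (res, bef) b).2 from rfl]
          rw [bodyA_ne res bef b hb hbef]
          rw [show blB bef [b] = (mergeOf bef b :: midOf b) ++ [bottomOf b] from rfl]
          rw [joinNL_append _ _ (by simp), joinNL_singleton]
          simp [String.append_assoc]
      | cons b2 bs2 =>
          rw [show goA (res, bef) (b :: b2 :: bs2) = goA (bodyA (res, bef) b) (b2 :: bs2) from rfl]
          rw [bodyA_ne res bef b hb hbef]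
          rw [ih (fun x hx => h x (List.mem_cons_of_mem _ hx)) _ _ (bottomOf_ne b hb) (by simp)]
          rw [show blB bef (b :: b2 :: bs2) =
                (mergeOf bef b :: midOf b) ++ blB (bottomOf b) (b2 :: bs2) from rfl]
          rw [joinNL_append _ _ (blB_ne_nil _ _)]
          simp [String.append_assoc]

theorem fold_goA (boxes : List Int) (m k : Nat) (st : String × String)
    (hk : k + m = boxes.length) :
    ((PySem.List.pyRange (k : Int) (boxes.length : Int) 1).foldl (paintStep boxes) st).1 =
      goA st (boxes.drop k) := by
  induction m generalizing k st with
  | zero =>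
      rw [PySem.List.pyRange_one_eq_nil (by exact_mod_cast Nat.le_of_eq (by omega))]
      rw [List.foldl_nil, List.drop_eq_nil_of_le (by omega)]
      rfl
  | succ m ih =>
      have hklt : k < boxes.length := by omega
      rw [PySem.List.pyRange_one_cons (by exact_mod_cast hklt), List.foldl_cons]
      rw [show (k : Int) + 1 = ((k + 1 : Nat) : Int) by push_cast; ring]
      rw [ih (k + 1) (paintStep boxes st (k : Int)) (by omega)]
      rw [List.drop_eq_getElem_cons hklt]
      have hget : PySem.List.pyGetD boxes ((k : Nat) : Int) 0 = boxes[k] := by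
        rw [PySem.List.pyGetD_natCast]; exact List.getD_eq_getElem _ _ hklt
      by_cases hlast : k = boxes.length - 1
      · have hdrop : boxes.drop (k + 1) = [] := List.drop_eq_nil_of_le (by omega)
        rw [hdrop]
        simp only [paintStep, hget]
        rw [if_pos (by push_cast; omega)]
        rfl
      · have hk1 : k + 1 < boxes.length := by omega
        rw [List.drop_eq_getElem_cons hk1]
        simp only [paintStep, hget]
        rw [if_neg (by push_cast; omega)]
        rfl

theorem foldB_join (bs : List Int) (ls : List String) (bef : String) :
    finB (bs.foldl stepB (ls, some bef)) = PySem.Str.join "\n" (ls ++ blB bef bs) := by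
  induction bs generalizing ls bef with
  | nil => rfl
  | cons b bs ih =>
      rw [List.foldl_cons]
      rw [show stepB (ls, some bef) b =
            (ls ++ [mergeOf bef b] ++ midOf b, some (bottomOf b)) from rfl]
      rw [ih]
      rw [show blB bef (b :: bs) = (mergeOf bef b :: midOf b) ++ blB (bottomOf b) bs from rfl]
      simp [List.append_assoc]

theorem paint_eq (boxes : List Int) (h : ∀ b ∈ boxes, keysP b) :
    paint_boxes boxes = finB (boxes.foldl stepB ([], none)) := by
  cases boxes with
  | nil =>
      rw [show finB (([] : List Int).foldl stepB ([], none)) = PySem.Str.join "\n" [] from rfl]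
      rw [joinNL_nil]
      unfold paint_boxes
      rw [PySem.List.pyRange_one_eq_nil (by norm_num)]
      rfl
  | cons b bs =>
      have hb : keysP b := h b (List.mem_cons_self)
      have hfold := fold_goA (b :: bs) (b :: bs).length 0 ("", "") (by omega)
      have hpaint : paint_boxes (b :: bs) = goA ("", "") (b :: bs) := by
        unfold paint_boxes
        rw [show ((0 : Nat) : Int) = (0 : Int) from rfl] at hfold
        rw [List.drop_zero] at hfold
        exact hfold
      rw [hpaint]
      cases bs with
      | nil =>
          rw [show goA ("", "") [b] = (bodyA ("", "") b).1 ++ (bodyA ("", "") b).2 from rfl]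
          rw [bodyA_emp "" b hb]
          rw [show ([b] : List Int).foldl stepB ([], none) =
                ([] ++ headsOf b, some (bottomOf b)) from rfl]
          rw [show finB (([] ++ headsOf b : List String), some (bottomOf b)) =
                PySem.Str.join "\n" (([] ++ headsOf b) ++ [bottomOf b]) from rfl]
          rw [joinNL_append _ _ (by simp), joinNL_singleton]
          simp [String.append_assoc]
      | cons b2 bs2 =>
          rw [show goA ("", "") (b :: b2 :: bs2) = goA (bodyA ("", "") b) (b2 :: bs2) from rfl]
          rw [bodyA_emp "" b hb]
          rw [goA_join (b2 :: bs2) (fun x hx => h x (List.mem_cons_of_mem _ hx)) _ _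
                (bottomOf_ne b hb) (by simp)]
          rw [List.foldl_cons]
          rw [show stepB ([], none) b = ([] ++ headsOf b, some (bottomOf b)) from rfl]
          rw [foldB_join]
          rw [joinNL_append _ _ (blB_ne_nil _ _)]
          simp [String.append_assoc]

-- ===== VERDICT (by name: the statement is the Claim_ definition above) =====
theorem distribute_weight_spec : Claim_equal_distribute_weight := by
  intro weight _
  unfold Spec_distribute_weight
  show paint_boxes _ = _
  rw [boxesA_eq, paint_eq _ (boxesB_mem weight)]
  rfl
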